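-- pv_equiv track=rewrite | github.com/Tymec/Playground | pTimeTracker.py | compare_processes
-- ===== SOURCE A (Python) =====
-- def compare_processes(main_dict, process_dict):
--     """Compares two dicts containing processes"""
--     main_dict_keys = main_dict.keys()
--     for process_name in [x for x in process_dict.keys()]:
--         # if process is still running
--         if process_name in main_dict_keys:
--             main_dict[process_name]['runtime'] += process_dict[process_name]['runtime']
--         # if a new process has been started
--         elif process_name not in main_dict_keys:
--             main_dict[process_name] = process_dict[process_name]
--     return main_dict
-- ===== SOURCE B (Python) =====
-- def compare_processes(main_dict, process_dict):
--     """Compares two dicts containing processes"""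
--     # symmetric merge: fold both item streams into one fresh dict,
--     # summing 'runtime' whenever a key collides with one already merged
--     merged = {}
--     for name, proc in list(main_dict.items()) + list(process_dict.items()):
--         if name in merged:
--             merged[name]['runtime'] += proc['runtime']
--         else:
--             merged[name] = proc
--     return merged
-- ===== Notes on version B (the rewrite author's own statement) =====
-- stated objective: alternative
-- what changed: A merges process_dict into main_dict with one branching pass keyed on main_dict membership; B is a symmetric merge: it folds the concatenation of both dicts' item streams into a fresh empty dict with a single uniform rule (sum 'runtime' on key collision, insert otherwise), testing membership only against the accumulator.
import Mathlib
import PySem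

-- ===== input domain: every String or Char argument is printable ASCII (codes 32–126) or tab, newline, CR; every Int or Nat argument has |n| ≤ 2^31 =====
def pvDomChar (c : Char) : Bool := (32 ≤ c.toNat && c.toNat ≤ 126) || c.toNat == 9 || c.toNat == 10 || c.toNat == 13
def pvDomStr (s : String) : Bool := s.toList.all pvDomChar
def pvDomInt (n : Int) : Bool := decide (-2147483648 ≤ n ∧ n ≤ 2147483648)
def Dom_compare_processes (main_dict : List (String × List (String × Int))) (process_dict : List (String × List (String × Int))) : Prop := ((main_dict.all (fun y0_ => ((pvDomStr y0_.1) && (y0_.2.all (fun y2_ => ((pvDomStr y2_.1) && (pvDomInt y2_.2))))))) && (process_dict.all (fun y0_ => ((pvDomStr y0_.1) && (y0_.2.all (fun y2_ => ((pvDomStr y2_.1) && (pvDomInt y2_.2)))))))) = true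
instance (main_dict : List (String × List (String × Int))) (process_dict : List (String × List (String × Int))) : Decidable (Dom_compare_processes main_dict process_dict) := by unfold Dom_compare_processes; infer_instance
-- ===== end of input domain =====

-- B replaces A's branching merge-into-main pass with a symmetric fold of BOTH item
-- streams into a fresh empty dict (sum 'runtime' on collision); alternative algorithm,
-- same cost. A mutates main_dict in place, B builds a new dict (mutating only shared
-- inner dicts): the equivalence proved here is about the RETURN value.


-- shared helpers: exact association-list renderings of Python dict primitives
-- (first-occurrence lookup; overwrite keeps position; new key appends)
def assocGetD {α : Type} (d : List (String × α)) (k : String) (dflt : α) : α :=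
  match d with
  | [] => dflt
  | (k', v) :: rest => if k' = k then v else assocGetD rest k dflt

-- d[k] = f(d[k]) when k is present; on an absent key Python raises KeyError (excluded
-- by Pre_): there this helper leaves d unchanged
def assocModify {α : Type} (d : List (String × α)) (k : String) (f : α → α) : List (String × α) :=
  match d with
  | [] => []
  | (k', v) :: rest => if k' = k then (k', f v) :: rest else (k', v) :: assocModify rest k f

def assocInsert {α : Type} (d : List (String × α)) (k : String) (v : α) : List (String × α) :=
  match d with
  | [] => [(k, v)]
  | (k', w) :: rest => if k' = k then (k', v) :: rest else (k', w) :: assocInsert rest k v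

-- ===== PORT A =====
-- one fold over process_dict's keys; 'elif not in' is the complement of the 'if', so it is the else branch
def compare_processes (main_dict : List (String × List (String × Int))) (process_dict : List (String × List (String × Int))) : List (String × List (String × Int)) :=
  (process_dict.map Prod.fst).foldl
    (fun acc process_name =>
      if (acc.map Prod.fst).contains process_name then
        assocModify acc process_name (fun inner =>
          assocModify inner "runtime" (fun r => r + assocGetD (assocGetD process_dict process_name []) "runtime" 0))
      else
        assocInsert acc process_name (assocGetD process_dict process_name []))
    main_dict

-- ===== PORT B =====
-- symmetric merge: fold the concatenated item streams into an empty dict;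
-- 'merged[name] = proc' on an absent key appends, so it is 'acc ++ [e]' under the guard
def compare_processes_alt (main_dict : List (String × List (String × Int))) (process_dict : List (String × List (String × Int))) : List (String × List (String × Int)) :=
  (main_dict ++ process_dict).foldl
    (fun acc e =>
      if (acc.map Prod.fst).contains e.1 then
        assocModify acc e.1 (fun inner =>
          assocModify inner "runtime" (fun r => r + assocGetD e.2 "runtime" 0))
      else
        acc ++ [e])
    []

-- ===== PRECONDITION & SPEC =====
-- Pre_ excludes (a) association lists with duplicate top-level keys, which do not represent
-- Python dicts at all, and (b) inputs where a shared process lacks a "runtime" entry in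
-- either dict, on which A (and B) raise KeyError.
def Pre_compare_processes (main_dict : List (String × List (String × Int))) (process_dict : List (String × List (String × Int))) : Prop :=
  (main_dict.map Prod.fst).Nodup ∧ (process_dict.map Prod.fst).Nodup ∧
  ∀ e ∈ main_dict, (process_dict.map Prod.fst).contains e.1 = true →
    (e.2.map Prod.fst).contains "runtime" = true ∧
    ((assocGetD process_dict e.1 []).map Prod.fst).contains "runtime" = true
instance (main_dict : List (String × List (String × Int))) (process_dict : List (String × List (String × Int))) : Decidable (Pre_compare_processes main_dict process_dict) := by unfold Pre_compare_processes; infer_instance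

def pvWitness_compare_processes : (List (String × List (String × Int))) × (List (String × List (String × Int))) :=
  ([("a", [("runtime", 1)])], [("a", [("runtime", 2)]), ("b", [("runtime", 3)])])

def Spec_compare_processes (main_dict : List (String × List (String × Int))) (process_dict : List (String × List (String × Int))) (out : List (String × List (String × Int))) : Prop := out = compare_processes_alt main_dict process_dict
instance (main_dict : List (String × List (String × Int))) (process_dict : List (String × List (String × Int))) (out : List (String × List (String × Int))) : Decidable (Spec_compare_processes main_dict process_dict out) := by unfold Spec_compare_processes; infer_instance

-- ===== CLAIM =====
def Claim_equal_compare_processes : Prop := ∀ (main_dict : List (String × List (String × Int))) (process_dict : List (String × List (String × Int))), Dom_compare_processes main_dict process_dict → Pre_compare_processes main_dict process_dict → Spec_compare_processes main_dict process_dict (compare_processes main_dict process_dict)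

-- ===== LEMMAS AND PROOFS =====

-- folds agree when the step functions agree on every list element
theorem foldl_ext_mem {α β : Type} (f g : α → β → α) (l : List β)
    (h : ∀ b ∈ l, ∀ a, f a b = g a b) : ∀ a, l.foldl f a = l.foldl g a := by
  induction l with
  | nil => intro a; rfl
  | cons x xs ih =>
    intro a
    simp only [List.foldl_cons]
    rw [h x (List.mem_cons_self) a]
    exact ih (fun b hb a => h b (List.mem_cons_of_mem _ hb) a) _

theorem getD_of_mem {α : Type} (d : List (String × α)) (k : String) (v : α) (dflt : α)
    (hnd : (d.map Prod.fst).Nodup) (hm : (k, v) ∈ d) : assocGetD d k dflt = v := by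
  induction d with
  | nil => cases hm
  | cons e rest ih =>
    obtain ⟨k', w⟩ := e
    simp only [List.map_cons, List.nodup_cons] at hnd
    rcases List.mem_cons.mp hm with h | h
    · cases h; simp [assocGetD]
    · have hne : k' ≠ k := by
        intro hk; exact hnd.1 (hk ▸ List.mem_map.mpr ⟨(k, v), h, rfl⟩)
      simpa [assocGetD, hne] using ih hnd.2 h

theorem assocInsert_absent {α : Type} (d : List (String × α)) (k : String) (v : α)
    (h : k ∉ d.map Prod.fst) :
    assocInsert d k v = d ++ [(k, v)] := by
  induction d with
  | nil => rfl
  | cons e rest ih =>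
    obtain ⟨k', w⟩ := e
    simp only [List.map_cons, List.mem_cons, not_or] at h
    simp only [assocInsert]
    rw [if_neg (fun hk => h.1 hk.symm)]
    simp [ih h.2]

-- phase 1 of B: folding a dict with nodup keys, all fresh w.r.t. acc, just appends it
theorem foldB_fresh (stepMod : String × List (String × Int) → List (String × Int) → List (String × Int)) :
    ∀ (md : List (String × List (String × Int))) (acc : List (String × List (String × Int))),
    (md.map Prod.fst).Nodup → (∀ k ∈ md.map Prod.fst, k ∉ acc.map Prod.fst) →
      md.foldl
        (fun acc e =>
          if (acc.map Prod.fst).contains e.1 then assocModify acc e.1 (stepMod e)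
          else acc ++ [e]) acc = acc ++ md := by
  intro md
  induction md with
  | nil => intro acc _ _; simp
  | cons e rest ih =>
    intro acc hnd hfresh
    obtain ⟨k, v⟩ := e
    simp only [List.map_cons, List.nodup_cons] at hnd
    have hk : k ∉ acc.map Prod.fst := hfresh k (by simp)
    simp only [List.foldl_cons]
    rw [if_neg (by simpa [List.contains_eq_mem] using hk)]
    rw [ih (acc ++ [(k, v)]) hnd.2 ?_]
    · simp
    · intro k' hk'
      simp only [List.map_append, List.mem_append, List.map_cons, List.map_nil,
        List.mem_singleton, not_or]
      exact ⟨fun h => hfresh k' (by simp [hk']) h,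
             fun h => hnd.1 (h ▸ hk')⟩

-- ===== VERDICT =====
theorem compare_processes_spec : Claim_equal_compare_processes := by
  intro md pd _ hpre
  obtain ⟨hmd, hpd, _⟩ := hpre
  show compare_processes md pd = compare_processes_alt md pd
  unfold compare_processes compare_processes_alt
  rw [List.foldl_append]
  rw [foldB_fresh _ md [] hmd (by simp)]
  simp only [List.nil_append]
  rw [List.foldl_map]
  apply foldl_ext_mem
  intro e he acc
  obtain ⟨k, v⟩ := e
  have hget : assocGetD pd k [] = v := getD_of_mem pd k v [] hpd he
  by_cases h : (acc.map Prod.fst).contains k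
  · rw [if_pos h, if_pos h, hget]
  · rw [if_neg h, if_neg h, hget,
      assocInsert_absent acc k v (by simpa [List.contains_eq_mem] using h)]
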